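-- pv_equiv track=rewrite | github.com/Tadjirovelzel/Artefactie | AAsegments.py | merge_close_runs
-- ===== SOURCE A (Python) =====
-- def merge_close_runs(runs, max_gap):
--     if not runs:
--         return []
--
--     merged = [list(runs[0])]
--     for s, e in runs[1:]:
--         if s - merged[-1][1] - 1 <= max_gap:
--             merged[-1][1] = e
--         else:
--             merged.append([s, e])
--
--     return [tuple(x) for x in merged]
-- ===== SOURCE B (Python) =====
-- def _group_end(end, rest, max_gap):
--     """Recursively extend the current group: while the next run starts within
--     max_gap of `end`, absorb it (the group's end becomes that run's end)."""
--     if rest and rest[0][0] - end - 1 <= max_gap: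
--         return _group_end(rest[0][1], rest[1:], max_gap)
--     return end, rest
--
--
-- def merge_close_runs(runs, max_gap):
--     if not runs:
--         return []
--     end, rest = _group_end(runs[0][1], runs[1:], max_gap)
--     return [(runs[0][0], end)] + merge_close_runs(rest, max_gap)
-- ===== Notes on version B (the rewrite author's own statement) =====
-- stated objective: alternative
-- what changed: Replaces A's single scan that mutates the last element of an accumulator list with a recursive decomposition: a helper consumes one whole group of close runs and returns its end plus the remaining runs, and the top-level function recurses on the remainder, building the output front-to-back with no mutation.
import Mathlib
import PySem

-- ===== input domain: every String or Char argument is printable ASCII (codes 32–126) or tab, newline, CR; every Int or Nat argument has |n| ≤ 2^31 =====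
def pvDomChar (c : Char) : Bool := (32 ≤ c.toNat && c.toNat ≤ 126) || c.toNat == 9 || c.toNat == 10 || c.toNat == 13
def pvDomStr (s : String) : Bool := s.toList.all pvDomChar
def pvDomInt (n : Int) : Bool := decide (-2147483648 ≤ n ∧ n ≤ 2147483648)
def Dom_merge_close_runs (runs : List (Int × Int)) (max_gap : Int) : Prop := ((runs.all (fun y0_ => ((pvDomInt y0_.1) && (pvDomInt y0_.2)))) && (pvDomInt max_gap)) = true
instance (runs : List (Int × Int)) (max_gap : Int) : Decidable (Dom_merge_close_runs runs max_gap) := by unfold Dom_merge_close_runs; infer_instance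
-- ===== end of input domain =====

-- B replaces A's scan that mutates the accumulator's last interval with a recursive
-- group-then-recurse decomposition (same output, same O(n) cost; objective: alternative).

-- ===== PORT A =====
-- A's loop: state = (merged[:-1], merged[-1]); 'merged[-1][1] = e' updates the pair,
-- 'merged.append([s, e])' moves the pair into the prefix.
def mergeLoopA (st : List (Int × Int) × (Int × Int)) (l : List (Int × Int)) (max_gap : Int) :
    List (Int × Int) × (Int × Int) :=
  match l with
  | [] => st
  | (s, e) :: tl =>
    if s - st.2.2 - 1 ≤ max_gap then mergeLoopA (st.1, (st.2.1, e)) tl max_gap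
    else mergeLoopA (st.1 ++ [st.2], (s, e)) tl max_gap

def merge_close_runs (runs : List (Int × Int)) (max_gap : Int) : List (Int × Int) :=
  match runs with
  | [] => []
  | r :: rest =>
    let st := mergeLoopA ([], r) rest max_gap
    st.1 ++ [st.2]

-- ===== PORT B =====
-- B's helper: absorb into the current group every following run that starts within
-- max_gap of `end`; return the group's end and the unconsumed runs.
def groupEnd (e : Int) (rest : List (Int × Int)) (max_gap : Int) : Int × List (Int × Int) :=
  match rest with
  | [] => (e, [])
  | (s', e') :: tl =>
    if s' - e - 1 ≤ max_gap then groupEnd e' tl max_gap else (e, (s', e') :: tl)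

theorem groupEnd_len (e : Int) (rest : List (Int × Int)) (max_gap : Int) :
    (groupEnd e rest max_gap).2.length ≤ rest.length := by
  induction rest generalizing e with
  | nil => simp [groupEnd]
  | cons h tl ih =>
    obtain ⟨s', e'⟩ := h
    simp only [groupEnd]
    split
    · exact le_trans (ih e') (Nat.le_succ _)
    · simp

def merge_close_runs_alt (runs : List (Int × Int)) (max_gap : Int) : List (Int × Int) :=
  match runs with
  | [] => []
  | (s, e) :: tl =>
    let g := groupEnd e tl max_gap
    (s, g.1) :: merge_close_runs_alt g.2 max_gap
termination_by runs.length
decreasing_by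
  simp only [List.length_cons]
  exact Nat.lt_succ_of_le (groupEnd_len e tl max_gap)

-- ===== PRECONDITION & SPEC =====
def Spec_merge_close_runs (runs : List (Int × Int)) (max_gap : Int) (out : List (Int × Int)) : Prop := out = merge_close_runs_alt runs max_gap
instance (runs : List (Int × Int)) (max_gap : Int) (out : List (Int × Int)) : Decidable (Spec_merge_close_runs runs max_gap out) := by unfold Spec_merge_close_runs; infer_instance

-- ===== CLAIM (what is proved, stated in full; the proofs are below) =====
def Claim_equal_merge_close_runs : Prop := ∀ (runs : List (Int × Int)) (max_gap : Int), Dom_merge_close_runs runs max_gap → Spec_merge_close_runs runs max_gap (merge_close_runs runs max_gap)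

-- ===== LEMMAS AND PROOFS =====

-- A's loop only ever appends to the accumulator prefix.
theorem mergeLoopA_acc (acc : List (Int × Int)) (c : Int × Int) (l : List (Int × Int))
    (max_gap : Int) :
    mergeLoopA (acc, c) l max_gap =
      (acc ++ (mergeLoopA ([], c) l max_gap).1, (mergeLoopA ([], c) l max_gap).2) := by
  induction l generalizing acc c with
  | nil => simp [mergeLoopA]
  | cons h tl ih =>
    obtain ⟨s, e⟩ := h
    simp only [mergeLoopA]
    split
    · exact ih acc (c.1, e)
    · simp only [List.nil_append]
      rw [ih (acc ++ [c]) (s, e), ih [c] (s, e)]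
      simp

-- The flattened loop state equals B's group-then-recurse result.
theorem loopA_eq_alt (l : List (Int × Int)) (s e max_gap : Int) :
    (mergeLoopA ([], (s, e)) l max_gap).1 ++ [(mergeLoopA ([], (s, e)) l max_gap).2] =
      (s, (groupEnd e l max_gap).1) :: merge_close_runs_alt (groupEnd e l max_gap).2 max_gap := by
  induction l generalizing s e with
  | nil => simp [mergeLoopA, groupEnd, merge_close_runs_alt]
  | cons h tl ih =>
    obtain ⟨s', e'⟩ := h
    simp only [mergeLoopA, groupEnd]
    split
    · exact ih s e'
    · simp only [List.nil_append]
      rw [mergeLoopA_acc [(s, e)] (s', e') tl max_gap]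
      simp only [List.cons_append, List.nil_append]
      rw [ih s' e']
      conv_rhs => rw [merge_close_runs_alt]

-- ===== VERDICT (by name: the statement is the Claim_ definition above) =====
theorem merge_close_runs_spec : Claim_equal_merge_close_runs := by
  intro runs max_gap _
  unfold Spec_merge_close_runs
  match runs with
  | [] => simp [merge_close_runs, merge_close_runs_alt]
  | (s, e) :: tl =>
    show (mergeLoopA ([], (s, e)) tl max_gap).1 ++ [(mergeLoopA ([], (s, e)) tl max_gap).2] = _
    rw [loopA_eq_alt]
    conv_rhs => rw [merge_close_runs_alt]
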